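-- pv_equiv track=rewrite | github.com/maqboolahmed24/Vecells | tools/release/build_release_candidate_freeze.py | overall_state
-- ===== SOURCE A (Python) =====
-- def overall_state(states: list[str]) -> str:
--     if any(state == "blocked" for state in states):
--         return "blocked"
--     if any(state == "stale" for state in states):
--         return "stale"
--     if any(state == "partial" for state in states):
--         return "partial"
--     return "exact"
-- ===== SOURCE B (Python) =====
-- def overall_state(states: list[str]) -> str:
--     rank = {"blocked": 0, "stale": 1, "partial": 2}
--     best = min((rank.get(s, 3) for s in states), default=3)
--     return ["blocked", "stale", "partial", "exact"][best]
-- ===== Notes on version B (the rewrite author's own statement) =====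
-- stated objective: alternative
-- what changed: Replaces the three cascading any() scans by a single pass computing the minimum priority rank (blocked=0, stale=1, partial=2, other=3) and indexing an ordered table with it.
import Mathlib
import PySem

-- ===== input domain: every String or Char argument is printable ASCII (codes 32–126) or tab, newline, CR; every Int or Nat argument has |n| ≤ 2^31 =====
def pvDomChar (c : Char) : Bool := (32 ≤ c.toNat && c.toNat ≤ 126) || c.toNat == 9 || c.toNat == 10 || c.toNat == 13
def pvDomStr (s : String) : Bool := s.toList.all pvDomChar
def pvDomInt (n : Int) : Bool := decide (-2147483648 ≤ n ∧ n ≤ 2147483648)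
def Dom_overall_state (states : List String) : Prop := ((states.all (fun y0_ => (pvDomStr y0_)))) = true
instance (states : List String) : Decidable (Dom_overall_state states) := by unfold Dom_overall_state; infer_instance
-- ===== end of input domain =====

-- ===== PORT A =====
-- B replaces A's three cascading any() scans by a single-pass minimum priority rank (alternative decomposition).
def overall_state (states : List String) : String :=
  if states.any (fun state => state == "blocked") then "blocked"
  else if states.any (fun state => state == "stale") then "stale"
  else if states.any (fun state => state == "partial") then "partial"
  else "exact"

-- ===== PORT B =====
def pvRank : PySem.Dict String Int :=
  PySem.Dict.ofList [("blocked", 0), ("stale", 1), ("partial", 2)]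

def overall_state_alt (states : List String) : String :=
  let vals := states.map (fun s => pvRank.getD s 3)
  let best : Int := match vals with
    | [] => 3
    | v :: vs => vs.foldl min v
  (PySem.List.pyGet? ["blocked", "stale", "partial", "exact"] best).getD ""

-- ===== PRECONDITION & SPEC =====
def Spec_overall_state (states : List String) (out : String) : Prop := out = overall_state_alt states
instance (states : List String) (out : String) : Decidable (Spec_overall_state states out) := by unfold Spec_overall_state; infer_instance

-- ===== CLAIM (what is proved, stated in full; the proofs are below) =====
def Claim_equal_overall_state : Prop := ∀ (states : List String), Dom_overall_state states → Spec_overall_state states (overall_state states)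

-- ===== LEMMAS AND PROOFS =====


-- rank of one state, unfolded
theorem pvRank_items : pvRank = PySem.Dict.mk [("blocked", 0), ("stale", 1), ("partial", 2)] := by
  decide

theorem pvRank_eq (s : String) : pvRank.getD s 3 =
    (if s = "blocked" then 0 else if s = "stale" then 1 else if s = "partial" then 2 else 3) := by
  rw [pvRank_items]
  by_cases h1 : s = "blocked"
  · subst h1; decide
  by_cases h2 : s = "stale"
  · subst h2; decide
  by_cases h3 : s = "partial"
  · subst h3; decide
  simp [PySem.Dict.getD, PySem.Dict.get?_mk_cons, PySem.Dict.get?, beq_iff_eq,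
    Ne.symm h1, Ne.symm h2, Ne.symm h3, h1, h2, h3]

theorem pvRank_le (s : String) : pvRank.getD s 3 ≤ 3 := by
  rw [pvRank_eq]; split_ifs <;> omega

def bestOf (states : List String) : Int :=
  if states.any (fun state => state == "blocked") then 0
  else if states.any (fun state => state == "stale") then 1
  else if states.any (fun state => state == "partial") then 2
  else 3

theorem pvBest_cons (s : String) (rest : List String) :
    min (pvRank.getD s 3) (bestOf rest) = bestOf (s :: rest) := by
  rw [pvRank_eq]
  unfold bestOf
  simp only [List.any_cons, Bool.or_eq_true, beq_iff_eq]
  split_ifs <;> first | omega | tauto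

theorem pvFoldl_best (rest : List String) (a : Int) (ha : a ≤ 3) :
    (rest.map (fun s => pvRank.getD s 3)).foldl min a = min a (bestOf rest) := by
  induction rest generalizing a with
  | nil => simp [bestOf]; omega
  | cons s rest ih =>
    simp only [List.map_cons, List.foldl_cons]
    rw [ih (min a (pvRank.getD s 3)) (by have := pvRank_le s; omega)]
    rw [min_assoc, pvBest_cons]

theorem pvAlt_eq (states : List String) :
    overall_state_alt states =
      (PySem.List.pyGet? ["blocked", "stale", "partial", "exact"] (bestOf states)).getD "" := by
  unfold overall_state_alt
  cases states with
  | nil => simp [bestOf]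
  | cons s rest =>
    simp only [List.map_cons]
    rw [pvFoldl_best rest (pvRank.getD s 3) (pvRank_le s), pvBest_cons]

-- ===== VERDICT (by name: the statement is the Claim_ definition above) =====
theorem overall_state_spec : Claim_equal_overall_state := by
  intro states _
  unfold Spec_overall_state
  rw [pvAlt_eq]
  unfold overall_state bestOf
  split_ifs <;> simp [PySem.List.pyGet?, PySem.List.pyIdx?]
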